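-- pv_equiv track=rewrite | github.com/KepLer100500/Manuals | Python/VK-basic-python/module02/task22/solution.py | make_most_common_keys
-- ===== SOURCE A (Python) =====
-- from typing import List, Dict
--
-- def make_most_common_keys(d: Dict[int, int]) -> List[int]:
--     values = sorted([val for key, val in d.items()])
--     values.reverse()
--     result = []
--     for value in values:
--         for key, val in d.items():
--             if value == val:
--                 result.append(key)
--
--     return result
-- ===== SOURCE B (Python) =====
-- from typing import List, Dict
--
-- def make_most_common_keys(d: Dict[int, int]) -> List[int]:
--     groups = {}
--     for key, val in d.items():
--         groups[val] = groups.get(val, []) + [key]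
--     result = []
--     for val in sorted(groups, reverse=True):
--         g = groups[val]
--         result += g * len(g)
--     return result
-- ===== Notes on version B (the rewrite author's own statement) =====
-- stated objective: faster
-- what changed: Instead of rescanning the whole dict once per value occurrence (quadratic), B groups keys by value in one pass, sorts the distinct values descending, and emits each group repeated len(group) times.
import Mathlib
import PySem

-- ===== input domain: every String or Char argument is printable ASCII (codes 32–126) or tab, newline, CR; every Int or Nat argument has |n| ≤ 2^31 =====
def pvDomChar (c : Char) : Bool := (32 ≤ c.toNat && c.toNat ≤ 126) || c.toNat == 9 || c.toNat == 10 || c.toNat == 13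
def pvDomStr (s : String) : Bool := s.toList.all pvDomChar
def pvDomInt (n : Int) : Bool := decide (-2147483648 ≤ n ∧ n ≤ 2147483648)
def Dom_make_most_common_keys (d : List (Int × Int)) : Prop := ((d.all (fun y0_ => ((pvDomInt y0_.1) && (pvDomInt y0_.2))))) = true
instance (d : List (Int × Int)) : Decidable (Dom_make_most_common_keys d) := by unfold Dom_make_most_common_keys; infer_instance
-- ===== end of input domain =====

-- B groups keys by value in one pass and emits each group repeated len(group) times, instead of
-- rescanning the whole dict once per value occurrence; same return value, proved below.

-- ===== PORT A =====
-- the dict argument, received as an association list, is the Python dict dict(d) (duplicate keys overwrite, first position kept)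
def make_most_common_keys (d : List (Int × Int)) : List Int :=
  let items := (PySem.Dict.ofList d).items
  let values := (PySem.List.sorted (items.map (fun p => p.2)) (fun x => x) false).reverse
  values.foldl (fun result value =>
    items.foldl (fun result p => if value == p.2 then result ++ [p.1] else result) result) []

-- ===== PORT B =====
def make_most_common_keys_alt (d : List (Int × Int)) : List Int :=
  let items := (PySem.Dict.ofList d).items
  let groups := items.foldl (fun g p => g.modify p.2 [] (fun cur => cur ++ [p.1]))
    (PySem.Dict.empty : PySem.Dict Int (List Int))
  (PySem.List.sorted groups.keys (fun x => x) true).foldl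
    (fun result val =>
      let g := groups.getD val []
      result ++ PySem.List.pyRepeat g (g.length : Int)) []

-- ===== PRECONDITION & SPEC =====
def Spec_make_most_common_keys (d : List (Int × Int)) (out : List Int) : Prop := out = make_most_common_keys_alt d
instance (d : List (Int × Int)) (out : List Int) : Decidable (Spec_make_most_common_keys d out) := by unfold Spec_make_most_common_keys; infer_instance

-- ===== CLAIM (what is proved, stated in full; the proofs are below) =====
def Claim_equal_make_most_common_keys : Prop := ∀ (d : List (Int × Int)), Dom_make_most_common_keys d → Spec_make_most_common_keys d (make_most_common_keys d)

-- ===== LEMMAS AND PROOFS =====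

-- the values column of the item list
def pvVals (l : List (Int × Int)) : List Int := l.map (·.2)
-- the keys whose value is v, in item order
def pvK (l : List (Int × Int)) (v : Int) : List Int := (l.filter (fun p => p.2 == v)).map (·.1)

-- A in flatMap normal form: for each value of the descending value list, all keys with that value
theorem pvA_norm (d : List (Int × Int)) :
    make_most_common_keys d =
      ((PySem.List.sorted (pvVals (PySem.Dict.ofList d).items) (fun x => x) false).reverse).flatMap
        (pvK (PySem.Dict.ofList d).items) := by
  unfold make_most_common_keys
  set l := (PySem.Dict.ofList d).items with hl
  have hinner : (fun (result : List Int) (value : Int) =>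
      l.foldl (fun result p => if value == p.2 then result ++ [p.1] else result) result)
      = fun result value => result ++ pvK l value := by
    funext res v
    rw [PySem.List.foldl_append_if]
    unfold pvK
    rw [List.filter_congr (fun p _ => Bool.beq_comm (a := v) (b := p.2))]
  simp only [hinner, pvVals]
  rw [PySem.List.foldl_append_eq_flatMap, List.nil_append]

-- B's grouping dict: lookups
theorem pvGroups_getD (l : List (Int × Int)) (v : Int) :
    (l.foldl (fun g p => g.modify p.2 [] (fun cur => cur ++ [p.1]))
      (PySem.Dict.empty : PySem.Dict Int (List Int))).getD v [] = pvK l v := by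
  have h := PySem.Dict.getD_foldl_modify_append (l := l.map (fun p => (p.2, p.1)))
    (d := (PySem.Dict.empty : PySem.Dict Int (List Int))) (c := v)
  rw [List.foldl_map] at h
  unfold pvK
  simpa [List.filter_map, Function.comp] using h

-- B's grouping dict: keys are the distinct values in first-occurrence order
theorem pvGroups_keys (l : List (Int × Int)) :
    (l.foldl (fun g p => g.modify p.2 [] (fun cur => cur ++ [p.1]))
      (PySem.Dict.empty : PySem.Dict Int (List Int))).keys = PySem.Set.ofList (pvVals l) := by
  rw [PySem.Dict.keys_foldl_modify_key]
  simp [PySem.Set.update_nil_left, pvVals]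

-- B in flatMap normal form
theorem pvB_norm (d : List (Int × Int)) :
    make_most_common_keys_alt d =
      (PySem.List.sorted (PySem.Set.ofList (pvVals (PySem.Dict.ofList d).items)) (fun x => x) true).flatMap
        (fun v => (List.replicate (pvK (PySem.Dict.ofList d).items v).length
                     (pvK (PySem.Dict.ofList d).items v)).flatten) := by
  simp only [make_most_common_keys_alt]
  set l := (PySem.Dict.ofList d).items with hl
  rw [pvGroups_keys]
  have hbody : (fun (result : List Int) (v : Int) =>
      result ++ PySem.List.pyRepeat
        ((l.foldl (fun g p => g.modify p.2 [] (fun cur => cur ++ [p.1]))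
          (PySem.Dict.empty : PySem.Dict Int (List Int))).getD v [])
        (((l.foldl (fun g p => g.modify p.2 [] (fun cur => cur ++ [p.1]))
          (PySem.Dict.empty : PySem.Dict Int (List Int))).getD v []).length : Int))
      = fun result v => result ++ (List.replicate (pvK l v).length (pvK l v)).flatten := by
    funext res v
    rw [pvGroups_getD]
    simp [PySem.List.pyRepeat]
  simp only [hbody]
  rw [PySem.List.foldl_append_eq_flatMap, List.nil_append]

-- |pvK l v| counts the occurrences of v among the values
theorem pvK_length (l : List (Int × Int)) (v : Int) :
    (pvK l v).length = (pvVals l).count v := by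
  unfold pvK pvVals
  simp [List.count, List.countP_eq_length_filter, List.filter_map, Function.comp_def]

theorem pvCount_replicate (a b : Int) (n : Nat) :
    (List.replicate n b).count a = if a = b then n else 0 := by
  rcases eq_or_ne a b with h | h
  · subst h
    simp
  · simp only [h, if_false]
    exact List.count_eq_zero.mpr (by simp [List.mem_replicate, h])

theorem pvCount_flatMap (a : Int) (l : List Int) (f : Int → List Int) :
    (l.flatMap f).count a = (l.map (fun v => (f v).count a)).sum := by
  induction l with
  | nil => simp
  | cons x t ih => simp [List.flatMap_cons, List.count_append, ih]

theorem pvSum_ite (S : List Int) (g : Int → Nat) (a : Int) (h : S.Nodup) :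
    (S.map (fun v => if a = v then g v else 0)).sum = if a ∈ S then g a else 0 := by
  induction S with
  | nil => simp
  | cons x t ih =>
    rcases List.nodup_cons.mp h with ⟨hx, ht⟩
    rcases eq_or_ne a x with rfl | hne
    · simp [ih ht, hx]
    · simp [hne, ih ht]

-- expanding each distinct value by its multiplicity is a permutation of the value list
theorem pvExpand_perm (vals : List Int) (S : List Int) (hnd : S.Nodup)
    (hm : ∀ a : Int, a ∈ S ↔ a ∈ vals) :
    (S.flatMap (fun v => List.replicate (vals.count v) v)).Perm vals := by
  rw [List.perm_iff_count]
  intro a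
  rw [pvCount_flatMap]
  have : (S.map (fun v => (List.replicate (vals.count v) v).count a))
      = S.map (fun v => if a = v then vals.count v else 0) := by
    apply List.map_congr_left
    intro v _
    exact pvCount_replicate a v (vals.count v)
  rw [this, pvSum_ite S _ a hnd]
  rcases Decidable.em (a ∈ S) with h | h
  · simp [h]
  · have : a ∉ vals := fun hv => h ((hm a).mpr hv)
    simp [h, List.count_eq_zero.mpr this]

theorem pvExpand_pairwise (S : List Int) (g : Int → Nat) (h : S.Pairwise (· ≤ ·)) :
    (S.flatMap (fun v => List.replicate (g v) v)).Pairwise (· ≤ ·) := by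
  induction S with
  | nil => simp
  | cons x t ih =>
    rcases List.pairwise_cons.mp h with ⟨hx, ht⟩
    rw [List.flatMap_cons, List.pairwise_append]
    refine ⟨?_, ih ht, ?_⟩
    · exact List.pairwise_replicate.mpr (Or.inr le_rfl)
    · intro a ha b hb
      obtain ⟨w, hw, hbw⟩ := List.mem_flatMap.mp hb
      rw [List.eq_of_mem_replicate ha, List.eq_of_mem_replicate hbw]
      exact hx w hw

-- the descending value list equals the sorted distinct values, each expanded by its multiplicity
theorem pvValues_expand (vals : List Int) :
    (PySem.List.sorted vals (fun x => x) false).reverse =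
      (PySem.List.sorted (PySem.Set.ofList vals) (fun x => x) true).flatMap
        (fun v => List.replicate (vals.count v) v) := by
  set S := PySem.List.sorted (PySem.Set.ofList vals) (fun x => x) true with hS
  set E := S.flatMap (fun v => List.replicate (vals.count v) v) with hE
  have hSperm : (PySem.Set.ofList vals).Perm S := (PySem.List.sorted_perm _ _ _).symm
  have hSnd : S.Nodup := hSperm.nodup (PySem.Set.nodup_ofList vals)
  have hrev : E.reverse = S.reverse.flatMap (fun v => List.replicate (vals.count v) v) := by
    rw [hE, List.reverse_flatMap]
    simp [Function.comp_def, List.reverse_replicate]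
  have hmem : ∀ a : Int, a ∈ S.reverse ↔ a ∈ vals := by
    intro a
    simp [List.mem_reverse, hS, PySem.List.mem_sorted, PySem.Set.mem_ofList]
  have hperm : E.reverse.Perm vals := by
    rw [hrev]
    exact pvExpand_perm vals S.reverse (List.nodup_reverse.mpr hSnd) hmem
  have hpw : E.reverse.Pairwise (fun a b => a ≤ b) := by
    rw [hrev]
    apply pvExpand_pairwise
    exact List.pairwise_reverse.mpr (PySem.List.sorted_pairwise_rev _ _)
  have : PySem.List.sorted vals (fun x => x) false = E.reverse :=
    PySem.List.sorted_id_eq_of_perm_of_pairwise (xs := vals) (ys := E.reverse) hperm hpw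
  rw [this, List.reverse_reverse]

-- the two normal forms coincide
theorem pvCore (l : List (Int × Int)) :
    ((PySem.List.sorted (pvVals l) (fun x => x) false).reverse).flatMap (pvK l) =
      (PySem.List.sorted (PySem.Set.ofList (pvVals l)) (fun x => x) true).flatMap
        (fun v => (List.replicate (pvK l v).length (pvK l v)).flatten) := by
  rw [pvValues_expand, List.flatMap_assoc]
  apply List.flatMap_congr  -- congruence over the outer list
  · intro v _
    rw [pvK_length]
    simp [List.flatMap_def, List.map_replicate]

-- ===== VERDICT (by name: the statement is the Claim_ definition above) =====
theorem make_most_common_keys_spec : Claim_equal_make_most_common_keys := by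
  intro d _
  unfold Spec_make_most_common_keys
  rw [pvA_norm, pvB_norm, pvCore]
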